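-- pv_equiv track=rewrite | github.com/seok0205/code-solution | programmers/26.04/260421_L1_중요한_단어를_스포_방지.py | solution
-- ===== SOURCE A (Python) =====
-- def solution(message, spoiler_ranges):
--     words = message.split()
--     words_spo = [0] * len(words)
--     spo = set()
--
--     idx = 0
--     word_idx = 0
--     range_idx = 0
--     while idx < len(message):
--         if message[idx] == ' ':
--             word_idx += 1
--
--         if range_idx < len(spoiler_ranges):
--             if idx >= spoiler_ranges[range_idx][0] and idx <= spoiler_ranges[range_idx][1] and message[idx] != ' ':
--                 words_spo[word_idx] = 1
--                 spo.add(words[word_idx])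
--
--             if idx == spoiler_ranges[range_idx][1]:
--                 range_idx += 1
--
--         idx += 1
--
--     answer = len(spo)
--     for word in spo:
--         for i in range(len(words)):
--             if word == words[i] and words_spo[i] == 0:
--                 answer -= 1
--                 break
--
--     return answer
-- ===== SOURCE B (Python) =====
-- def solution(message, spoiler_ranges):
--     # One pass over the characters: walk the spoiler ranges sequentially while
--     # building each word in place, and keep a dict word -> "every occurrence
--     # seen so far was spoiled".  The answer is the number of True entries.
--     fully = {}
--     cur = []
--     occ = False
--     ri = 0
--     for i, ch in enumerate(message):
--         hit = False
--         if ri < len(spoiler_ranges):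
--             a, b = spoiler_ranges[ri]
--             hit = a <= i <= b
--             if i == b:
--                 ri += 1
--         if ch == ' ':
--             if cur:
--                 w = ''.join(cur)
--                 fully[w] = fully.get(w, True) and occ
--                 cur = []
--                 occ = False
--         else:
--             cur.append(ch)
--             occ = occ or hit
--     if cur:
--         w = ''.join(cur)
--         fully[w] = fully.get(w, True) and occ
--     return sum(fully.values())
-- ===== Notes on version B (the rewrite author's own statement) =====
-- stated objective: faster
-- what changed: Replaces A's split()+space-counting bookkeeping (words_spo array, spo set) and its final quadratic pass (for every spoiled word a scan over all words) with a single pass over the characters that builds each word in place and maintains a dict word -> 'every occurrence seen so far was spoiled', whose True entries are counted.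
-- outside the precondition, e.g. on solution(' a', [(1, 1)]): A raises IndexError, B returns 1; on solution('a\ta', [(0, 0)]): A returns 0, B returns 1
import Mathlib
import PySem

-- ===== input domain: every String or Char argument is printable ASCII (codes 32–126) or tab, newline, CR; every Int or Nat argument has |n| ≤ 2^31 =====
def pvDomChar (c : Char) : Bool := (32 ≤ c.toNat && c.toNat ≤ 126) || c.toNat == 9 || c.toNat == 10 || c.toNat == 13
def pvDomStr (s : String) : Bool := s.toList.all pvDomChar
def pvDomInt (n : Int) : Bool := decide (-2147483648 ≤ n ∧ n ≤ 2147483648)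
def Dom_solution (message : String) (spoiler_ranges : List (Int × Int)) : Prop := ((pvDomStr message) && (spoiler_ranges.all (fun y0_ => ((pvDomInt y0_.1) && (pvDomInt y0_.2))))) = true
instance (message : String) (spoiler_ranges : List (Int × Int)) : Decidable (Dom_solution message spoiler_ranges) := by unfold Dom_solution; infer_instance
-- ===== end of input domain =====

-- B replaces A's split()+space-counting bookkeeping and its final quadratic pass
-- (for every spoiled word a scan over all words) by a single pass over the characters
-- that maintains a dict word -> "every occurrence seen so far was spoiled".


-- ===== PORT A =====
-- A's inner 'for i in range(len(words)): … break' loop over words/words_spo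
def pvScanBreak (word : String) : List (String × Int) → Int → Int
  | [], answer => answer
  | p :: rest, answer =>
      if p.1 == word && p.2 == 0 then answer - 1 else pvScanBreak word rest answer

-- the body of A's while-loop; state = (words_spo, spo, word_idx, range_idx)
def pvStepA (words : List String) (spoiler_ranges : List (Int × Int))
    (st : List Int × PySem.Set String × Nat × Nat) (p : Int × Char) :
    List Int × PySem.Set String × Nat × Nat :=
  let wi := if p.2 == ' ' then st.2.2.1 + 1 else st.2.2.1
  let ri := st.2.2.2
  if hri : ri < spoiler_ranges.length then
    let r := spoiler_ranges[ri]
    if decide (p.1 ≥ r.1) && decide (p.1 ≤ r.2) && (p.2 != ' ') then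
      -- Python raises IndexError when wi ≥ len(words); Pre_solution excludes exactly
      -- those inputs (List.set is then a no-op and getD a placeholder)
      (st.1.set wi 1, st.2.1.add (words.getD wi ""),
       wi, if p.1 == r.2 then ri + 1 else ri)
    else (st.1, st.2.1, wi, if p.1 == r.2 then ri + 1 else ri)
  else (st.1, st.2.1, wi, ri)

-- A iterates 'for word in spo' over a set; the running count it produces does not
-- depend on that iteration order (each distinct word changes 'answer' independently)
def solution (message : String) (spoiler_ranges : List (Int × Int)) : Int :=
  let words := PySem.Str.split₀ message
  let st := (PySem.List.enumerate message.toList).foldl (pvStepA words spoiler_ranges)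
      (List.replicate words.length 0, PySem.Set.empty, 0, 0)
  st.2.1.foldl (fun answer word => pvScanBreak word (words.zip st.1) answer)
    (st.2.1.length : Int)

-- ===== PORT B =====
-- Source B: close the current word into the dict (fully[w] = fully.get(w, True) and occ)
def pvClose (fully : PySem.Dict String Bool) (cur : List Char) (occ : Bool) :
    PySem.Dict String Bool :=
  let w := String.ofList cur
  fully.insert w (fully.getD w true && occ)

-- the body of Source B's for-loop; state = (fully, cur, occ, ri)
def pvStepB (spoiler_ranges : List (Int × Int))
    (st : PySem.Dict String Bool × List Char × Bool × Nat) (p : Int × Char) :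
    PySem.Dict String Bool × List Char × Bool × Nat :=
  let hr : Bool × Nat :=
    if hri : st.2.2.2 < spoiler_ranges.length then
      let r := spoiler_ranges[st.2.2.2]
      (decide (r.1 ≤ p.1 ∧ p.1 ≤ r.2), if p.1 == r.2 then st.2.2.2 + 1 else st.2.2.2)
    else (false, st.2.2.2)
  if p.2 == ' ' then
    if st.2.1.isEmpty then (st.1, st.2.1, st.2.2.1, hr.2)
    else (pvClose st.1 st.2.1 st.2.2.1, [], false, hr.2)
  else (st.1, st.2.1 ++ [p.2], st.2.2.1 || hr.1, hr.2)

def solution_alt (message : String) (spoiler_ranges : List (Int × Int)) : Int :=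
  let st := (PySem.List.enumerate message.toList).foldl (pvStepB spoiler_ranges)
      (PySem.Dict.empty, [], false, 0)
  let fully := if st.2.1.isEmpty then st.1 else pvClose st.1 st.2.1 st.2.2.1
  (fully.values.count true : Int)

-- ===== PRECONDITION & SPEC =====
-- Pre_solution admits messages in the problem's format (spaces are the only whitespace,
-- single and not leading) and, for arbitrary messages, spoiler lists whose ranges all miss
-- the message (then no position is ever spoiled and both programs agree trivially).
-- Outside it A's space-counted word index diverges from split(): A raises IndexError when
-- a spoiler range covers such a position, and where it still returns it can credit a
-- spoiler to the wrong word (see the excluded examples in the claim).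
def Pre_solution (message : String) (spoiler_ranges : List (Int × Int)) : Prop :=
  (message.toList.head? ≠ some ' ' ∧
   (message.toList.all (fun c => c != '\t' && c != '\n' && c != '\r')) = true ∧
   List.IsChain (fun a b => a = ' ' → b ≠ ' ') message.toList) ∨
  (∀ r ∈ spoiler_ranges, r.2 < 0 ∨ (message.toList.length : Int) ≤ r.1 ∨ r.2 < r.1)
instance (message : String) (spoiler_ranges : List (Int × Int)) :
    Decidable (Pre_solution message spoiler_ranges) := by unfold Pre_solution; infer_instance

def pvWitness_solution : String × (List (Int × Int)) := ("ab c", [(0, 0)])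

def Spec_solution (message : String) (spoiler_ranges : List (Int × Int)) (out : Int) : Prop :=
  out = solution_alt message spoiler_ranges
instance (message : String) (spoiler_ranges : List (Int × Int)) (out : Int) :
    Decidable (Spec_solution message spoiler_ranges out) := by unfold Spec_solution; infer_instance

-- ===== CLAIM (what is proved, stated in full; the proofs are below) =====
def Claim_equal_solution : Prop := ∀ (message : String) (spoiler_ranges : List (Int × Int)), Dom_solution message spoiler_ranges → Pre_solution message spoiler_ranges → Spec_solution message spoiler_ranges (solution message spoiler_ranges)

-- ===== LEMMAS AND PROOFS =====

-- ===== LEMMAS AND PROOFS =====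

def pvFlags (rs : List (Int × Int)) : Nat → Int → List Char → List Bool
  | _, _, [] => []
  | ri, i, _ :: t =>
    if hri : ri < rs.length then
      (decide (i ≥ rs[ri].1) && decide (i ≤ rs[ri].2)) ::
        pvFlags rs (if i == rs[ri].2 then ri + 1 else ri) (i + 1) t
    else false :: pvFlags rs ri (i + 1) t

def pvZStepA (ws : List String) (st : List Int × PySem.Set String × Nat) (p : Char × Bool) :
    List Int × PySem.Set String × Nat :=
  let wi := if p.1 == ' ' then st.2.2 + 1 else st.2.2
  if p.2 && (p.1 != ' ') then (st.1.set wi 1, st.2.1.add (ws.getD wi ""), wi)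
  else (st.1, st.2.1, wi)

lemma fuseA (ws : List String) (rs : List (Int × Int)) :
    ∀ (cs : List Char) (i : Int) (ri : Nat) (wsp : List Int) (spo : PySem.Set String) (wi : Nat),
    ∃ rf, (PySem.List.enumerate cs i).foldl (pvStepA ws rs) (wsp, spo, wi, ri)
      = (((cs.zip (pvFlags rs ri i cs)).foldl (pvZStepA ws) (wsp, spo, wi)).1,
         ((cs.zip (pvFlags rs ri i cs)).foldl (pvZStepA ws) (wsp, spo, wi)).2.1,
         ((cs.zip (pvFlags rs ri i cs)).foldl (pvZStepA ws) (wsp, spo, wi)).2.2, rf) := by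
  intro cs
  induction cs with
  | nil => intro i ri wsp spo wi; exact ⟨ri, by simp [PySem.List.enumerate, pvFlags]⟩
  | cons c t ih =>
      intro i ri wsp spo wi
      rw [PySem.List.enumerate_cons]
      by_cases hri : ri < rs.length
      · simp only [pvFlags, dif_pos hri, List.zip_cons_cons, List.foldl_cons]
        simp only [pvStepA, pvZStepA, dif_pos hri]
        by_cases hc : (decide (i ≥ rs[ri].1) && decide (i ≤ rs[ri].2) && (c != ' ')) = true
        · simp only [hc, if_true]
          exact ih (i+1) _ _ _ _
        · rw [Bool.not_eq_true] at hc
          simp only [hc, Bool.false_eq_true, if_false]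
          exact ih (i+1) _ _ _ _
      · simp only [pvFlags, dif_neg hri, List.zip_cons_cons, List.foldl_cons]
        simp only [pvStepA, pvZStepA, dif_neg hri, Bool.false_and, Bool.false_eq_true, if_false]
        exact ih (i+1) _ _ _ _

def pvZStepB (st : PySem.Dict String Bool × List Char × Bool) (p : Char × Bool) :
    PySem.Dict String Bool × List Char × Bool :=
  if p.1 == ' ' then
    if st.2.1.isEmpty then st else (pvClose st.1 st.2.1 st.2.2, [], false)
  else (st.1, st.2.1 ++ [p.1], st.2.2 || p.2)

lemma fuseB (rs : List (Int × Int)) :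
    ∀ (cs : List Char) (i : Int) (ri : Nat) (d : PySem.Dict String Bool) (cur : List Char) (occ : Bool),
    ∃ rf, (PySem.List.enumerate cs i).foldl (pvStepB rs) (d, cur, occ, ri)
      = (((cs.zip (pvFlags rs ri i cs)).foldl pvZStepB (d, cur, occ)).1,
         ((cs.zip (pvFlags rs ri i cs)).foldl pvZStepB (d, cur, occ)).2.1,
         ((cs.zip (pvFlags rs ri i cs)).foldl pvZStepB (d, cur, occ)).2.2, rf) := by
  intro cs
  induction cs with
  | nil => intro i ri d cur occ; exact ⟨ri, by simp [PySem.List.enumerate, pvFlags]⟩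
  | cons c t ih =>
      intro i ri d cur occ
      rw [PySem.List.enumerate_cons]
      by_cases hri : ri < rs.length
      · simp only [pvFlags, dif_pos hri, List.zip_cons_cons, List.foldl_cons]
        simp only [pvStepB, pvZStepB, dif_pos hri]
        have hd : decide (rs[ri].1 ≤ i ∧ i ≤ rs[ri].2) = (decide (i ≥ rs[ri].1) && decide (i ≤ rs[ri].2)) := by
          simp [Bool.decide_and, ge_iff_le]
        rw [hd]
        by_cases hc : (c == ' ') = true
        · by_cases he : cur.isEmpty = true
          · simp only [hc, he, if_true]; exact ih (i+1) _ _ _ _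
          · rw [Bool.not_eq_true] at he
            simp only [hc, he, Bool.false_eq_true, if_true, if_false]
            exact ih (i+1) _ _ _ _
        · rw [Bool.not_eq_true] at hc
          simp only [hc, Bool.false_eq_true, if_false]
          exact ih (i+1) _ _ _ _
      · simp only [pvFlags, dif_neg hri, List.zip_cons_cons, List.foldl_cons]
        simp only [pvStepB, pvZStepB, dif_neg hri]
        by_cases hc : (c == ' ') = true
        · by_cases he : cur.isEmpty = true
          · simp only [hc, he, if_true]; exact ih (i+1) _ _ _ _
          · rw [Bool.not_eq_true] at he
            simp only [hc, he, Bool.false_eq_true, if_true, if_false]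
            exact ih (i+1) _ _ _ _
        · rw [Bool.not_eq_true] at hc
          simp only [hc, Bool.false_eq_true, if_false, Bool.or_false]
          exact ih (i+1) _ _ _ _

inductive pvShaped : List (Char × Bool) → List (List (Char × Bool)) → Prop
  | nil : pvShaped [] []
  | last (s : List (Char × Bool)) (h1 : s ≠ []) (h2 : ∀ p ∈ s, p.1 ≠ ' ') : pvShaped s [s]
  | cons (s : List (Char × Bool)) (b : Bool) (z : List (Char × Bool))
      (segs : List (List (Char × Bool)))
      (h1 : s ≠ []) (h2 : ∀ p ∈ s, p.1 ≠ ' ') (h : pvShaped z segs) :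
      pvShaped (s ++ (' ', b) :: z) (s :: segs)

lemma pvShaped_exists :
    ∀ (n : Nat) (m : List (Char × Bool)), m.length ≤ n →
    (m.map Prod.fst).head? ≠ some ' ' →
    List.IsChain (fun a b => a = ' ' → b ≠ ' ') (m.map Prod.fst) →
    ∃ segs, pvShaped m segs := by
  intro n
  induction n with
  | zero =>
      intro m hlen _ _
      have : m = [] := List.length_eq_zero_iff.mp (Nat.le_zero.mp hlen)
      exact ⟨[], this ▸ pvShaped.nil⟩
  | succ n ih =>
      intro m hlen hhd hch
      rcases m with _ | ⟨p, t⟩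
      · exact ⟨[], pvShaped.nil⟩
      generalize hgen : p :: t = m at hhd hch hlen ⊢
      have hhead : m.head? = some p := by rw [← hgen]; rfl
      have hp : p.1 ≠ ' ' := by
        intro h; apply hhd
        rw [← hgen]
        simp [h]
      have hsr : m.takeWhile (fun q => q.1 != ' ') ++ m.dropWhile (fun q => q.1 != ' ') = m :=
        List.takeWhile_append_dropWhile
      have hs1 : m.takeWhile (fun q => q.1 != ' ') ≠ [] := by
        have hpb : (p.1 != ' ') = true := by simp [hp]
        rw [← hgen]
        simp [List.takeWhile_cons, hpb]
      have hs2 : ∀ q ∈ m.takeWhile (fun q => q.1 != ' '), q.1 ≠ ' ' := by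
        intro q hq
        have := List.mem_takeWhile_imp hq
        simpa using this
      rcases hr : m.dropWhile (fun q => q.1 != ' ') with _ | ⟨q, z⟩
      · rw [hr, List.append_nil] at hsr
        exact ⟨[m], hsr ▸ pvShaped.last _ hs1 hs2⟩
      have hq1 : q.1 = ' ' := by
        have := List.head_dropWhile_not (fun q => q.1 != ' ') (l := m) (by simp [hr])
        simp [hr] at this
        exact this
      have hrsuf : m.dropWhile (fun q => q.1 != ' ') <:+ m := List.dropWhile_suffix _
      have hchr : List.IsChain (fun a b => a = ' ' → b ≠ ' ') ((q :: z).map Prod.fst) := by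
        rw [← hr]
        exact hch.suffix (hrsuf.map Prod.fst)
      have hzhd : (z.map Prod.fst).head? ≠ some ' ' := by
        simp only [List.map_cons] at hchr
        rcases hz : z with _ | ⟨q2, z'⟩
        · simp
        · have h2 := (List.isChain_cons.mp hchr).1 q2.1 (by simp [hz])
          simp [hz]
          exact h2 hq1
      have hchz : List.IsChain (fun a b => a = ' ' → b ≠ ' ') (z.map Prod.fst) := by
        apply hchr.suffix
        exact (List.suffix_cons q z).map Prod.fst
      have hzlen : z.length ≤ n := by
        have h1 : (m.takeWhile (fun q => q.1 != ' ')).length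
            + (m.dropWhile (fun q => q.1 != ' ')).length = m.length := by
          rw [← List.length_append, hsr]
        have h2 : 1 ≤ (m.takeWhile (fun q => q.1 != ' ')).length :=
          List.length_pos_iff.mpr hs1
        rw [hr] at h1
        simp only [List.length_cons] at h1
        omega
      obtain ⟨segs, hsh⟩ := ih z hzlen hzhd hchz
      have hmeq : m = m.takeWhile (fun q => q.1 != ' ') ++ (' ', q.2) :: z := by
        conv_lhs => rw [← hsr]
        rw [hr]
        congr 2
        rw [← hq1]
      have hres := pvShaped.cons _ q.2 z segs hs1 hs2 hsh
      rw [← hmeq] at hres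
      exact ⟨_, hres⟩

lemma pvZStepA_word (ws : List String) :
    ∀ (s : List (Char × Bool)), (∀ p ∈ s, p.1 ≠ ' ') →
    ∀ (wsp : List Int) (spo : PySem.Set String) (k : Nat),
    s.foldl (pvZStepA ws) (wsp, spo, k)
      = (if s.any (·.2) then (wsp.set k 1, spo.add (ws.getD k ""), k) else (wsp, spo, k)) := by
  intro s
  induction s with
  | nil => intro _ wsp spo k; simp
  | cons p t ih =>
      intro h2 wsp spo k
      have hp : (p.1 == ' ') = false := by simp [h2 p (by simp)]
      have hp' : (p.1 != ' ') = true := by simp [bne, hp]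
      rw [List.foldl_cons]
      by_cases hb : p.2 = true
      · have hstep : pvZStepA ws (wsp, spo, k) p = (wsp.set k 1, spo.add (ws.getD k ""), k) := by
          simp [pvZStepA, hp, hp', hb]
        rw [hstep, ih (fun q hq => h2 q (by simp [hq]))]
        by_cases ht : t.any (·.2) = true
        · simp [ht, hb, List.set_set, PySem.Set.add_of_mem
            (s := spo.add (ws.getD k "")) ((PySem.Set.mem_add _ _ _).mpr (Or.inr rfl))]
        · rw [Bool.not_eq_true] at ht
          simp [ht, hb]
      · rw [Bool.not_eq_true] at hb
        have hstep : pvZStepA ws (wsp, spo, k) p = (wsp, spo, k) := by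
          simp [pvZStepA, hp, hb]
        rw [hstep, ih (fun q hq => h2 q (by simp [hq]))]
        simp [hb]

def pvAccA (ws : List String) :
    List Int × PySem.Set String → Nat → List (List (Char × Bool)) → List Int × PySem.Set String
  | st, _, [] => st
  | st, k, s :: r =>
      pvAccA ws (if s.any (·.2) then (st.1.set k 1, st.2.add (ws.getD k "")) else st) (k + 1) r

lemma pvZStepA_shaped (ws : List String) {z : List (Char × Bool)} {segs : List (List (Char × Bool))}
    (hs : pvShaped z segs) :
    ∀ (wsp : List Int) (spo : PySem.Set String) (k : Nat),
    ∃ k', z.foldl (pvZStepA ws) (wsp, spo, k)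
      = ((pvAccA ws (wsp, spo) k segs).1, (pvAccA ws (wsp, spo) k segs).2, k') := by
  induction hs with
  | nil => intro wsp spo k; exact ⟨k, by simp [pvAccA]⟩
  | last s h1 h2 =>
      intro wsp spo k
      refine ⟨k, ?_⟩
      rw [pvZStepA_word ws s h2]
      by_cases hb : s.any (·.2) = true
      · simp [hb, pvAccA]
      · rw [Bool.not_eq_true] at hb; simp [hb, pvAccA]
  | cons s b z segs h1 h2 h ih =>
      intro wsp spo k
      rw [List.foldl_append, pvZStepA_word ws s h2, List.foldl_cons]
      have hsp : ∀ (st : List Int × PySem.Set String × Nat),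
          pvZStepA ws st (' ', b) = (st.1, st.2.1, st.2.2 + 1) := by
        intro st; simp [pvZStepA]
      by_cases hb : s.any (·.2) = true
      · simp only [hb, if_true, hsp]
        obtain ⟨k', hk⟩ := ih (wsp.set k 1) (spo.add (ws.getD k "")) (k + 1)
        exact ⟨k', by rw [hk]; simp [pvAccA, hb]⟩
      · rw [Bool.not_eq_true] at hb
        simp only [hb, Bool.false_eq_true, if_false, hsp]
        obtain ⟨k', hk⟩ := ih wsp spo (k + 1)
        exact ⟨k', by rw [hk]; simp [pvAccA, hb]⟩

lemma pvAccA_fst (ws : List String) :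
    ∀ (segs : List (List (Char × Bool))) (pre : List Int) (spo : PySem.Set String),
    (pvAccA ws (pre ++ List.replicate segs.length 0, spo) pre.length segs).1
      = pre ++ segs.map (fun s => if s.any (·.2) then (1 : Int) else 0) := by
  intro segs
  induction segs with
  | nil => intro pre spo; simp [pvAccA]
  | cons s r ih =>
      intro pre spo
      have hset : (pre ++ List.replicate (s :: r).length 0).set pre.length 1
          = (pre ++ [(1 : Int)]) ++ List.replicate r.length 0 := by
        rw [List.length_cons, List.replicate_succ, List.set_append_right _ _ (le_refl _)]
        simp
      by_cases hb : s.any (·.2) = true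
      · simp only [pvAccA, hb, if_true]
        have h1 : pre.length + 1 = (pre ++ [(1:Int)]).length := by simp
        rw [hset, h1, ih (pre ++ [(1:Int)]) (spo.add (ws.getD pre.length ""))]
        simp only [List.map_cons, hb, if_true]
        simp
      · rw [Bool.not_eq_true] at hb
        simp only [pvAccA, hb, Bool.false_eq_true, if_false]
        have h0 : pre ++ List.replicate (s :: r).length 0
            = (pre ++ [(0:Int)]) ++ List.replicate r.length 0 := by
          rw [List.length_cons, List.replicate_succ]; simp
        have h1 : pre.length + 1 = (pre ++ [(0:Int)]).length := by simp
        rw [h0, h1, ih (pre ++ [(0:Int)]) spo]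
        simp only [List.map_cons, hb, Bool.false_eq_true, if_false]
        simp

lemma pvAccA_snd_mem (ws : List String) :
    ∀ (segs : List (List (Char × Bool))) (st : List Int × PySem.Set String) (k : Nat) (w : String),
    w ∈ (pvAccA ws st k segs).2 ↔
      w ∈ st.2 ∨ ∃ j, ∃ _ : j < segs.length, (segs[j].any (·.2)) = true ∧ w = ws.getD (k + j) "" := by
  intro segs
  induction segs with
  | nil => intro st k w; simp [pvAccA]
  | cons s r ih =>
      intro st k w
      rw [pvAccA, ih]
      by_cases hb : s.any (·.2) = true
      · simp only [hb, if_true, PySem.Set.mem_add]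
        constructor
        · rintro ((hw | hw) | ⟨j, hj, hj2, hj3⟩)
          · exact Or.inl hw
          · exact Or.inr ⟨0, by simp, by simpa using hb, by simpa using hw⟩
          · exact Or.inr ⟨j + 1, by simpa using hj, by simpa using hj2,
              by simpa [Nat.add_assoc, Nat.add_comm 1 j] using hj3⟩
        · rintro (hw | ⟨j, hj, hj2, hj3⟩)
          · exact Or.inl (Or.inl hw)
          · cases j with
            | zero => exact Or.inl (Or.inr (by simpa using hj3))
            | succ j => exact Or.inr ⟨j, by simpa using hj, by simpa using hj2,
                by simpa [Nat.add_assoc, Nat.add_comm 1 j] using hj3⟩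
      · rw [Bool.not_eq_true] at hb
        simp only [hb, Bool.false_eq_true, if_false]
        constructor
        · rintro (hw | ⟨j, hj, hj2, hj3⟩)
          · exact Or.inl hw
          · exact Or.inr ⟨j + 1, by simpa using hj, by simpa using hj2,
              by simpa [Nat.add_assoc, Nat.add_comm 1 j] using hj3⟩
        · rintro (hw | ⟨j, hj, hj2, hj3⟩)
          · exact Or.inl hw
          · cases j with
            | zero => simp [hb] at hj2
            | succ j => exact Or.inr ⟨j, by simpa using hj, by simpa using hj2,
                by simpa [Nat.add_assoc, Nat.add_comm 1 j] using hj3⟩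

lemma pvAccA_snd_nodup (ws : List String) :
    ∀ (segs : List (List (Char × Bool))) (st : List Int × PySem.Set String) (k : Nat),
    st.2.Nodup → (pvAccA ws st k segs).2.Nodup := by
  intro segs
  induction segs with
  | nil => intro st k h; simpa [pvAccA] using h
  | cons s r ih =>
      intro st k h
      rw [pvAccA]
      by_cases hb : s.any (·.2) = true
      · simp only [hb, if_true]
        exact ih _ _ (PySem.Set.nodup_add _ _ h)
      · rw [Bool.not_eq_true] at hb
        simp only [hb, Bool.false_eq_true, if_false]
        exact ih _ _ h

lemma split₀_go_word :
    ∀ (w : List Char), (∀ c ∈ w, PySem.Chars.isspace c = false) →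
    ∀ (rest cur : List Char) (acc : List (List Char)),
    PySem.Chars.split₀.go (w ++ rest) cur acc = PySem.Chars.split₀.go rest (w.reverse ++ cur) acc := by
  intro w
  induction w with
  | nil => intro _ rest cur acc; simp
  | cons c t ih =>
      intro h rest cur acc
      have hc : PySem.Chars.isspace c = false := h c (by simp)
      rw [List.cons_append, PySem.Chars.split₀.go, if_neg (by simp [hc])]
      rw [ih (fun d hd => h d (by simp [hd])) rest (c :: cur) acc]
      simp

lemma split₀_shaped {m : List (Char × Bool)} {segs : List (List (Char × Bool))}
    (hs : pvShaped m segs) :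
    (∀ p ∈ m, p.1 ≠ ' ' → PySem.Chars.isspace p.1 = false) →
    ∀ acc, PySem.Chars.split₀.go (m.map Prod.fst) [] acc
      = acc.reverse ++ segs.map (fun s => s.map Prod.fst) := by
  induction hs with
  | nil => intro _ acc; simp [PySem.Chars.split₀.go]
  | last s h1 h2 =>
      intro hns acc
      have : s.map Prod.fst ++ [] = s.map Prod.fst := by simp
      rw [← this, split₀_go_word _ (by
        intro c hc
        obtain ⟨p, hp, hpc⟩ := List.mem_map.mp hc
        exact hpc ▸ hns p hp (h2 p hp))]
      rw [PySem.Chars.split₀.go]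
      have hne : ((s.map Prod.fst).reverse ++ []).isEmpty = false := by
        simp [List.isEmpty_iff, h1]
      rw [if_neg (by simp [h1])]
      simp
  | cons s b z segs h1 h2 h ih =>
      intro hns acc
      have hmap : (s ++ (' ', b) :: z).map Prod.fst = s.map Prod.fst ++ ' ' :: z.map Prod.fst := by
        simp
      rw [hmap, split₀_go_word _ (by
        intro c hc
        obtain ⟨p, hp, hpc⟩ := List.mem_map.mp hc
        exact hpc ▸ hns p (by simp [hp]) (h2 p hp))]
      rw [PySem.Chars.split₀.go, if_pos (by simp [PySem.Chars.isspace])]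
      have hne : ((s.map Prod.fst).reverse ++ []).isEmpty = false := by
        simp [List.isEmpty_iff, h1]
      rw [if_neg (by simp [h1])]
      rw [ih (fun p hp hq => hns p (by simp [hp]) hq) _]
      simp

def pvSegs : List (Char × Bool) → List Char → Bool → List (List Char × Bool)
  | [], cur, occ => if cur.isEmpty then [] else [(cur, occ)]
  | p :: t, cur, occ =>
      if p.1 == ' ' then
        if cur.isEmpty then pvSegs t [] false else (cur, occ) :: pvSegs t [] false
      else pvSegs t (cur ++ [p.1]) (occ || p.2)

lemma pvZStepB_segs :
    ∀ (z : List (Char × Bool)) (d : PySem.Dict String Bool) (cur : List Char) (occ : Bool),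
    (cur.isEmpty = true → occ = false) →
    (let st := z.foldl pvZStepB (d, cur, occ)
     if st.2.1.isEmpty then st.1 else pvClose st.1 st.2.1 st.2.2)
      = (pvSegs z cur occ).foldl (fun d q => pvClose d q.1 q.2) d := by
  intro z
  induction z with
  | nil =>
      intro d cur occ hco
      by_cases he : cur.isEmpty = true
      · simp [pvSegs, he]
      · rw [Bool.not_eq_true] at he; simp [pvSegs, he]
  | cons p t ih =>
      intro d cur occ hco
      rw [pvSegs]
      by_cases hsp : (p.1 == ' ') = true
      · by_cases he : cur.isEmpty = true
        · have hocc := hco he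
          have hc : cur = [] := List.isEmpty_iff.mp he
          subst hc
          subst hocc
          simp only [List.foldl_cons, pvZStepB, hsp, List.isEmpty_nil, if_true]
          exact ih d [] false (fun _ => rfl)
        · rw [Bool.not_eq_true] at he
          simp only [List.foldl_cons, pvZStepB, hsp, he, Bool.false_eq_true, if_true, if_false]
          rw [ih (pvClose d cur occ) [] false (fun _ => rfl)]
      · rw [Bool.not_eq_true] at hsp
        simp only [List.foldl_cons, pvZStepB, hsp, Bool.false_eq_true, if_false]
        exact ih d (cur ++ [p.1]) (occ || p.2) (by simp)

lemma pvSegs_word :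
    ∀ (s : List (Char × Bool)), (∀ p ∈ s, p.1 ≠ ' ') →
    ∀ (rest : List (Char × Bool)) (cur : List Char) (occ : Bool),
    pvSegs (s ++ rest) cur occ = pvSegs rest (cur ++ s.map Prod.fst) (occ || s.any (·.2)) := by
  intro s
  induction s with
  | nil => intro _ rest cur occ; simp
  | cons p t ih =>
      intro h2 rest cur occ
      have hp : (p.1 == ' ') = false := by simp [h2 p (by simp)]
      rw [List.cons_append, pvSegs, if_neg (by simp [hp])]
      rw [ih (fun q hq => h2 q (by simp [hq]))]
      simp [Bool.or_assoc]

lemma pvSegs_shaped {z : List (Char × Bool)} {segs : List (List (Char × Bool))}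
    (hs : pvShaped z segs) :
    pvSegs z [] false = segs.map (fun s => (s.map Prod.fst, s.any (·.2))) := by
  induction hs with
  | nil => simp [pvSegs]
  | last s h1 h2 =>
      have : s ++ [] = s := by simp
      rw [← this, pvSegs_word s h2]
      simp [pvSegs, h1]
  | cons s b z segs h1 h2 h ih =>
      rw [pvSegs_word s h2, pvSegs, if_pos (by simp)]
      rw [if_neg (by simp [h1])]
      simp [ih]

lemma pvScanBreak_eq (w : String) :
    ∀ (pairs : List (String × Int)) (a : Int),
    pvScanBreak w pairs a = a - (if pairs.any (fun p => p.1 == w && p.2 == 0) then 1 else 0) := by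
  intro pairs
  induction pairs with
  | nil => intro a; simp [pvScanBreak]
  | cons p rest ih =>
      intro a
      by_cases h : (p.1 == w && p.2 == 0) = true
      · simp [pvScanBreak, h]
      · simp [pvScanBreak, h, ih]

lemma pvFoldSub (P : String → Bool) :
    ∀ (l : List String) (a : Int),
    l.foldl (fun a w => a - (if P w then 1 else 0)) a = a - l.countP P := by
  intro l
  induction l with
  | nil => intro a; simp
  | cons w rest ih =>
      intro a
      by_cases h : P w <;> simp [List.countP_cons, h, ih] <;> ring

lemma pvDict_getD (l : List (String × Bool)) :
    ∀ (d : PySem.Dict String Bool) (w : String),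
    ((l.foldl (fun d q => d.insert q.1 (d.getD q.1 true && q.2)) d).getD w true)
      = (d.getD w true && (l.filter (fun q => q.1 == w)).all (·.2)) := by
  induction l with
  | nil => intro d w; simp
  | cons q rest ih =>
      intro d w
      by_cases h : q.1 = w
      · subst h
        simp [ih, PySem.Dict.getD_insert, Bool.and_assoc]
      · have h' : (q.1 == w) = false := by simp [h]
        simp [ih, PySem.Dict.getD_insert, h', Ne.symm h]

lemma pvFlags_length (rs : List (Int × Int)) :
    ∀ (cs : List Char) (ri : Nat) (i : Int), (pvFlags rs ri i cs).length = cs.length := by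
  intro cs
  induction cs with
  | nil => intro ri i; simp [pvFlags]
  | cons c t ih =>
      intro ri i
      by_cases h : ri < rs.length <;> simp [pvFlags, h, ih]

-- ranges that miss every position of the remaining suffix never fire
lemma pvDeadA (ws : List String) (rs : List (Int × Int)) :
    ∀ (cs : List Char) (i : Int) (ri wi : Nat) (wsp : List Int) (spo : PySem.Set String),
    (∀ r ∈ rs, r.2 < i ∨ i + cs.length ≤ r.1 ∨ r.2 < r.1) →
    ∃ wsp' wi' ri',
      (PySem.List.enumerate cs i).foldl (pvStepA ws rs) (wsp, spo, wi, ri)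
        = (wsp', spo, wi', ri') := by
  intro cs
  induction cs with
  | nil => intro i ri wi wsp spo _; exact ⟨wsp, wi, ri, by simp [PySem.List.enumerate]⟩
  | cons c t ih =>
      intro i ri wi wsp spo hdead
      rw [PySem.List.enumerate_cons, List.foldl_cons]
      have hdead' : ∀ r ∈ rs, r.2 < i + 1 ∨ (i + 1) + (t.length : Int) ≤ r.1 ∨ r.2 < r.1 := by
        intro r hr
        have := hdead r hr
        simp only [List.length_cons] at this
        push_cast at this ⊢
        omega
      by_cases hri : ri < rs.length
      · have hr := hdead rs[ri] (List.getElem_mem hri)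
        have hhit : (decide (i ≥ rs[ri].1) && decide (i ≤ rs[ri].2) && (c != ' ')) = false := by
          have : ¬(rs[ri].1 ≤ i ∧ i ≤ rs[ri].2) := by
            simp only [List.length_cons] at hr
            push_cast at hr
            omega
          by_cases h1 : rs[ri].1 ≤ i <;> by_cases h2 : i ≤ rs[ri].2 <;>
            simp [h1, h2] <;> exact absurd ⟨h1, h2⟩ this
        rw [show pvStepA ws rs (wsp, spo, wi, ri) (i, c)
            = (wsp, spo, (if c == ' ' then wi + 1 else wi),
               if (i : Int) == rs[ri].2 then ri + 1 else ri) from by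
          simp only [pvStepA, dif_pos hri, hhit, Bool.false_eq_true, if_false]]
        exact ih (i + 1) _ _ _ _ hdead'
      · rw [show pvStepA ws rs (wsp, spo, wi, ri) (i, c)
            = (wsp, spo, (if c == ' ' then wi + 1 else wi), ri) from by
          simp only [pvStepA, dif_neg hri]]
        exact ih (i + 1) _ _ _ _ hdead'

lemma pvValues_insert_false {d : PySem.Dict String Bool} (hd : ∀ v ∈ d.values, v = false)
    (w : String) (b : Bool) (hb : b = false) : ∀ v ∈ (d.insert w b).values, v = false := by
  intro v hv
  unfold PySem.Dict.insert at hv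
  by_cases hc : d.contains w = true
  · simp only [hc, if_true, PySem.Dict.values, List.mem_map] at hv
    obtain ⟨p, hp, hpv⟩ := hv
    obtain ⟨a, ha, hap⟩ := hp
    subst hap
    by_cases hpw : (a.1 == w) = true
    · rw [if_pos hpw] at hpv
      rw [← hpv]; exact hb
    · rw [if_neg hpw] at hpv
      rw [← hpv]
      exact hd a.2 (List.mem_map_of_mem ha)
  · rw [Bool.not_eq_true] at hc
    simp only [hc, Bool.false_eq_true, if_false, PySem.Dict.values, List.map_append] at hv
    rcases List.mem_append.mp hv with h | h
    · exact hd v h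
    · simpa [hb] using h

lemma pvDeadB (rs : List (Int × Int)) :
    ∀ (cs : List Char) (i : Int) (ri : Nat) (d : PySem.Dict String Bool)
      (cur : List Char) (occ : Bool),
    (∀ r ∈ rs, r.2 < i ∨ i + cs.length ≤ r.1 ∨ r.2 < r.1) →
    (∀ v ∈ d.values, v = false) → occ = false →
    (∀ v ∈ ((PySem.List.enumerate cs i).foldl (pvStepB rs) (d, cur, occ, ri)).1.values, v = false)
      ∧ ((PySem.List.enumerate cs i).foldl (pvStepB rs) (d, cur, occ, ri)).2.2.1 = false := by
  intro cs
  induction cs with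
  | nil =>
      intro i ri d cur occ _ hd hocc
      constructor
      · simpa [PySem.List.enumerate] using hd
      · simpa [PySem.List.enumerate] using hocc
  | cons c t ih =>
      intro i ri d cur occ hdead hd hocc
      rw [PySem.List.enumerate_cons, List.foldl_cons]
      have hdead' : ∀ r ∈ rs, r.2 < i + 1 ∨ (i + 1) + (t.length : Int) ≤ r.1 ∨ r.2 < r.1 := by
        intro r hr
        have := hdead r hr
        simp only [List.length_cons] at this
        push_cast at this ⊢
        omega
      have hhit : ∀ (hri : ri < rs.length), (decide (rs[ri].1 ≤ i ∧ i ≤ rs[ri].2)) = false := by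
        intro hri
        have hr := hdead rs[ri] (List.getElem_mem hri)
        simp only [List.length_cons] at hr
        push_cast at hr
        simp only [decide_eq_false_iff_not]
        omega
      -- compute the step: the hit flag is false in every branch
      by_cases hsp : (c == ' ') = true
      · by_cases he : cur.isEmpty = true
        · rw [show pvStepB rs (d, cur, occ, ri) (i, c) = (d, cur, occ,
              (if hri : ri < rs.length then (if (i : Int) == rs[ri].2 then ri + 1 else ri) else ri)) from by
            by_cases hri : ri < rs.length <;>
              simp only [pvStepB, hri, dite_true, dite_false, hsp, he, if_true]]
          exact ih (i + 1) _ _ _ _ hdead' hd hocc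
        · rw [Bool.not_eq_true] at he
          rw [show pvStepB rs (d, cur, occ, ri) (i, c) = (pvClose d cur occ, [], false,
              (if hri : ri < rs.length then (if (i : Int) == rs[ri].2 then ri + 1 else ri) else ri)) from by
            by_cases hri : ri < rs.length <;>
              simp only [pvStepB, hri, dite_true, dite_false, hsp, he, Bool.false_eq_true,
                if_true, if_false]]
          refine ih (i + 1) _ _ _ _ hdead' ?_ rfl
          exact pvValues_insert_false hd _ _ (by simp [hocc])
      · rw [Bool.not_eq_true] at hsp
        rw [show pvStepB rs (d, cur, occ, ri) (i, c) = (d, cur ++ [c],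
            (occ || (if hri : ri < rs.length then decide (rs[ri].1 ≤ i ∧ i ≤ rs[ri].2) else false)),
            (if hri : ri < rs.length then (if (i : Int) == rs[ri].2 then ri + 1 else ri) else ri)) from by
          by_cases hri : ri < rs.length <;>
            simp only [pvStepB, hri, dite_true, dite_false, hsp, Bool.false_eq_true, if_false]]
        have hocc' : (occ || (if hri : ri < rs.length then decide (rs[ri].1 ≤ i ∧ i ≤ rs[ri].2) else false)) = false := by
          by_cases hri : ri < rs.length
          · simp [hri, hhit hri, hocc]
          · simp [hri, hocc]
        rw [hocc']
        exact ih (i + 1) _ _ _ _ hdead' hd rfl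

-- printable non-space characters are not Python whitespace
lemma pvIsspace_false (c : Char) (h1 : 32 < c.toNat) (h2 : c.toNat ≤ 126) :
    PySem.Chars.isspace c = false := by
  simp only [PySem.Chars.isspace]
  simp only [Bool.or_eq_false_iff, Bool.and_eq_false_iff, decide_eq_false_iff_not]
  omega

lemma pvCount_true_map (l : List String) (f : String → Bool) :
    (l.map f).count true = l.countP f := by
  rw [List.count_eq_countP, List.countP_map]
  simp [Function.comp_def]

lemma pvAll_filter (S : List (String × Bool)) (w : String) :
    ((S.filter (fun q => q.1 == w)).all (·.2)) = !(S.any (fun q => q.1 == w && !q.2)) := by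
  induction S with
  | nil => simp
  | cons q t ih =>
      by_cases h : (q.1 == w) = true <;> by_cases h2 : q.2 = true <;> simp [h, h2, ih]

-- ===== VERDICT (by name: the statement is the Claim_ definition above) =====
theorem solution_spec : Claim_equal_solution := by
  intro message spoiler_ranges hdom hpre
  unfold Spec_solution
  rcases hpre with hfmt | hdead
  case inr =>
    -- every spoiler range misses the message: both programs count nothing
    have hdead0 : ∀ r ∈ spoiler_ranges,
        r.2 < (0 : Int) ∨ (0 : Int) + (message.toList.length : Int) ≤ r.1 ∨ r.2 < r.1 := by
      intro r hr
      have := hdead r hr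
      omega
    obtain ⟨wsp', wi', ri', hA⟩ := pvDeadA (PySem.Str.split₀ message) spoiler_ranges
      message.toList 0 0 0 (List.replicate (PySem.Str.split₀ message).length 0)
      PySem.Set.empty hdead0
    have hAz : solution message spoiler_ranges = 0 := by
      simp only [solution]
      rw [hA]
      rfl
    have hB := pvDeadB spoiler_ranges message.toList 0 0 PySem.Dict.empty [] false hdead0
      (by intro v hv; simp [PySem.Dict.empty, PySem.Dict.values] at hv) rfl
    have hBz : solution_alt message spoiler_ranges = 0 := by
      simp only [solution_alt]
      have hfalse : ∀ v ∈ (if ((PySem.List.enumerate message.toList).foldl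
            (pvStepB spoiler_ranges) (PySem.Dict.empty, [], false, 0)).2.1.isEmpty then
            ((PySem.List.enumerate message.toList).foldl (pvStepB spoiler_ranges)
              (PySem.Dict.empty, [], false, 0)).1
          else pvClose ((PySem.List.enumerate message.toList).foldl (pvStepB spoiler_ranges)
              (PySem.Dict.empty, [], false, 0)).1
            ((PySem.List.enumerate message.toList).foldl (pvStepB spoiler_ranges)
              (PySem.Dict.empty, [], false, 0)).2.1
            ((PySem.List.enumerate message.toList).foldl (pvStepB spoiler_ranges)
              (PySem.Dict.empty, [], false, 0)).2.2.1).values, v = false := by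
        by_cases he : ((PySem.List.enumerate message.toList).foldl (pvStepB spoiler_ranges)
            (PySem.Dict.empty, [], false, 0)).2.1.isEmpty = true
        · rw [if_pos he]; exact hB.1
        · rw [if_neg he]
          exact pvValues_insert_false hB.1 _ _ (by rw [hB.2]; simp)
      have : (List.count true (if ((PySem.List.enumerate message.toList).foldl
            (pvStepB spoiler_ranges) (PySem.Dict.empty, [], false, 0)).2.1.isEmpty then
            ((PySem.List.enumerate message.toList).foldl (pvStepB spoiler_ranges)
              (PySem.Dict.empty, [], false, 0)).1
          else pvClose ((PySem.List.enumerate message.toList).foldl (pvStepB spoiler_ranges)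
              (PySem.Dict.empty, [], false, 0)).1
            ((PySem.List.enumerate message.toList).foldl (pvStepB spoiler_ranges)
              (PySem.Dict.empty, [], false, 0)).2.1
            ((PySem.List.enumerate message.toList).foldl (pvStepB spoiler_ranges)
              (PySem.Dict.empty, [], false, 0)).2.2.1).values) = 0 := by
        rw [List.count_eq_zero]
        intro hmem
        have hft := hfalse true hmem
        simp at hft
      rw [this]
      simp
    rw [hAz, hBz]
  obtain ⟨hpre1, hpre2, hpre3⟩ := hfmt
  have hlenf : (pvFlags spoiler_ranges 0 0 message.toList).length = message.toList.length :=
    pvFlags_length spoiler_ranges message.toList 0 0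
  have hmfst : (message.toList.zip (pvFlags spoiler_ranges 0 0 message.toList)).map Prod.fst
      = message.toList := List.map_fst_zip (by rw [hlenf])
  obtain ⟨segs, hs⟩ := pvShaped_exists
    (message.toList.zip (pvFlags spoiler_ranges 0 0 message.toList)).length _ le_rfl
    (by rw [hmfst]; exact hpre1) (by rw [hmfst]; exact hpre3)
  -- characters are not Python whitespace unless they are the space character
  have hns : ∀ p ∈ message.toList.zip (pvFlags spoiler_ranges 0 0 message.toList),
      p.1 ≠ ' ' → PySem.Chars.isspace p.1 = false := by
    intro p hp hne
    have hcmem : p.1 ∈ message.toList := by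
      rw [← hmfst]; exact List.mem_map_of_mem hp
    have hdc : pvDomChar p.1 = true := by
      unfold Dom_solution at hdom
      simp only [Bool.and_eq_true] at hdom
      have := hdom.1
      unfold pvDomStr at this
      rw [List.all_eq_true] at this
      exact this p.1 hcmem
    have hpre2' := List.all_eq_true.mp hpre2 p.1 hcmem
    simp only [Bool.and_eq_true, bne_iff_ne] at hpre2'
    obtain ⟨⟨ht, hn⟩, hr⟩ := hpre2'
    unfold pvDomChar at hdc
    simp only [Bool.or_eq_true, Bool.and_eq_true, decide_eq_true_eq, beq_iff_eq] at hdc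
    have hne32 : p.1.toNat ≠ 32 := by
      intro h32
      exact hne (by apply Char.ext; apply UInt32.toNat_inj.mp; exact h32)
    have hne9 : p.1.toNat ≠ 9 := by
      intro h
      exact ht (by apply Char.ext; apply UInt32.toNat_inj.mp; exact h)
    have hne10 : p.1.toNat ≠ 10 := by
      intro h
      exact hn (by apply Char.ext; apply UInt32.toNat_inj.mp; exact h)
    have hne13 : p.1.toNat ≠ 13 := by
      intro h
      exact hr (by apply Char.ext; apply UInt32.toNat_inj.mp; exact h)
    apply pvIsspace_false <;> omega
  -- the word list of A is the list of shaped segments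
  have hsplit : PySem.Str.split₀ message
      = segs.map (fun s => String.ofList (s.map Prod.fst)) := by
    show (PySem.Chars.split₀ message.toList).map String.ofList = _
    show (PySem.Chars.split₀.go message.toList [] []).map String.ofList = _
    rw [← hmfst, split₀_shaped hs hns []]
    simp [List.map_map]
  have hlen_ws : (PySem.Str.split₀ message).length = segs.length := by rw [hsplit]; simp
  -- ===== the A side =====
  obtain ⟨rf, hA⟩ := fuseA (PySem.Str.split₀ message) spoiler_ranges message.toList 0 0
      (List.replicate (PySem.Str.split₀ message).length 0) PySem.Set.empty 0
  obtain ⟨k', hA2⟩ := pvZStepA_shaped (PySem.Str.split₀ message) hs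
      (List.replicate (PySem.Str.split₀ message).length 0) PySem.Set.empty 0
  have hstate : (PySem.List.enumerate message.toList).foldl
        (pvStepA (PySem.Str.split₀ message) spoiler_ranges)
        (List.replicate (PySem.Str.split₀ message).length 0, PySem.Set.empty, 0, 0)
      = ((pvAccA (PySem.Str.split₀ message)
            (List.replicate (PySem.Str.split₀ message).length 0, PySem.Set.empty) 0 segs).1,
         (pvAccA (PySem.Str.split₀ message)
            (List.replicate (PySem.Str.split₀ message).length 0, PySem.Set.empty) 0 segs).2,
         k', rf) := by
    rw [hA, hA2]
  have hsolA : solution message spoiler_ranges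
      = (pvAccA (PySem.Str.split₀ message)
            (List.replicate (PySem.Str.split₀ message).length 0, PySem.Set.empty) 0 segs).2.foldl
          (fun answer word => pvScanBreak word ((PySem.Str.split₀ message).zip
            (pvAccA (PySem.Str.split₀ message)
              (List.replicate (PySem.Str.split₀ message).length 0, PySem.Set.empty) 0 segs).1) answer)
          (((pvAccA (PySem.Str.split₀ message)
            (List.replicate (PySem.Str.split₀ message).length 0, PySem.Set.empty) 0 segs).2.length : Int)) := by
    simp only [solution]
    rw [hstate]
  set ws := PySem.Str.split₀ message with hws
  set accA := pvAccA ws (List.replicate ws.length 0, PySem.Set.empty) 0 segs with hacc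
  set S := segs.map (fun s => (String.ofList (s.map Prod.fst), s.any (·.2))) with hS
  have hwsS : ws = S.map Prod.fst := by rw [hsplit, hS, List.map_map]; rfl
  have hacc1 : accA.1 = S.map (fun q => if q.2 then (1 : Int) else 0) := by
    rw [hacc, show List.replicate ws.length (0 : Int) = [] ++ List.replicate segs.length 0 by
      simp [hlen_ws]]
    rw [show (0 : Nat) = ([] : List Int).length by simp]
    rw [pvAccA_fst ws segs [] PySem.Set.empty]
    rw [hS, List.map_map]
    simp
  have hgetj : ∀ j, j < S.length → ws.getD j "" = (S.map Prod.fst).getD j "" := by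
    intro j hj
    rw [hwsS]
  have haccmem : ∀ w, w ∈ accA.2 ↔ ∃ q ∈ S, q.2 = true ∧ q.1 = w := by
    intro w
    rw [hacc, pvAccA_snd_mem ws segs (List.replicate ws.length 0, PySem.Set.empty) 0 w]
    constructor
    · rintro (h | ⟨j, hj, hj2, hj3⟩)
      · exact absurd h (by simp [PySem.Set.empty])
      · have hjS : j < S.length := by simp [hS, hj]
        refine ⟨S[j]'hjS, List.getElem_mem _, ?_, ?_⟩
        · simp [hS, hj2]
        · rw [hj3, Nat.zero_add, hgetj j hjS,
            List.getD_eq_getElem (S.map Prod.fst) "" (by simpa using hjS)]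
          simp
    · rintro ⟨q, hq, hq2, hq3⟩
      obtain ⟨j, hj, hjq⟩ := List.mem_iff_getElem.mp hq
      right
      refine ⟨j, by simpa [hS] using hj, ?_, ?_⟩
      · have : q.2 = (segs[j]'(by simpa [hS] using hj)).any (·.2) := by
          rw [← hjq]; simp [hS]
        rw [← this]; exact hq2
      · rw [← hq3, Nat.zero_add, hgetj j hj,
          List.getD_eq_getElem (S.map Prod.fst) "" (by simpa using hj)]
        simp [hjq]
  have haccnd : accA.2.Nodup := by
    rw [hacc]
    exact pvAccA_snd_nodup ws segs _ 0 (by simp [PySem.Set.empty])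
  -- A's final loop, as a count over the distinct spoiled words
  have hAval : solution message spoiler_ranges
      = (accA.2.countP (fun w => !(S.any (fun q => q.1 == w && !q.2))) : Int) := by
    rw [hsolA]
    have hzip : ws.zip accA.1 = S.map (fun q => (q.1, if q.2 then (1 : Int) else 0)) := by
      rw [hwsS, hacc1, List.zip_map']
    have hfn : (fun (answer : Int) (word : String) => pvScanBreak word (ws.zip accA.1) answer)
        = fun a w => a - (if (ws.zip accA.1).any (fun p => p.1 == w && p.2 == 0) then 1 else 0) := by
      funext a w
      exact pvScanBreak_eq w (ws.zip accA.1) a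
    rw [hfn, pvFoldSub]
    have hPA : ∀ w, ((ws.zip accA.1).any (fun p => p.1 == w && p.2 == 0))
        = S.any (fun q => q.1 == w && !q.2) := by
      intro w
      rw [hzip, List.any_map]
      apply List.any_congr rfl
      intro q
      cases hq : q.2 <;> simp [Function.comp, hq]
    have hcp : accA.2.countP (fun w => (ws.zip accA.1).any (fun p => p.1 == w && p.2 == 0))
        = accA.2.countP (fun w => S.any (fun q => q.1 == w && !q.2)) :=
      List.countP_congr (fun w _ => by rw [hPA])
    rw [hcp]
    have hlen := List.length_eq_countP_add_countP
      (p := fun w => S.any (fun q => q.1 == w && !q.2)) (l := accA.2)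
    have hnot : accA.2.countP (fun a => decide ¬((fun w => S.any (fun q => q.1 == w && !q.2)) a = true))
        = accA.2.countP (fun w => !(S.any (fun q => q.1 == w && !q.2))) := by
      apply List.countP_congr
      intro w _
      cases hw : S.any (fun q => q.1 == w && !q.2) <;> simp [hw]
    rw [hnot] at hlen
    omega
  -- ===== the B side =====
  obtain ⟨rf2, hB⟩ := fuseB spoiler_ranges message.toList 0 0 PySem.Dict.empty [] false
  have hdict := pvZStepB_segs (message.toList.zip (pvFlags spoiler_ranges 0 0 message.toList))
      PySem.Dict.empty [] false (fun _ => rfl)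
  rw [pvSegs_shaped hs] at hdict
  simp only at hdict
  have hfold2 : (segs.map (fun s => (s.map Prod.fst, s.any (·.2)))).foldl
        (fun d q => pvClose d q.1 q.2) PySem.Dict.empty
      = S.foldl (fun d q => d.insert q.1 (d.getD q.1 true && q.2)) PySem.Dict.empty := by
    rw [hS, List.foldl_map, List.foldl_map]
    rfl
  have hsolB : solution_alt message spoiler_ranges
      = ((S.foldl (fun d q => d.insert q.1 (d.getD q.1 true && q.2))
          PySem.Dict.empty).values.count true : Int) := by
    simp only [solution_alt]
    rw [hB, ← hfold2, ← hdict]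
  set D := S.foldl (fun d q => d.insert q.1 (d.getD q.1 true && q.2)) PySem.Dict.empty with hD
  have hkeys : D.keys = PySem.Set.ofList (S.map Prod.fst) := by
    rw [hD, PySem.Dict.keys_foldl_insert_key S Prod.fst
      (fun d q => d.getD q.1 true && q.2) PySem.Dict.empty]
    rw [show (PySem.Dict.empty : PySem.Dict String Bool).keys = [] from rfl,
      PySem.Set.update_nil_left]
  have hknd : D.keys.Nodup := by
    rw [hD]
    exact PySem.Dict.nodup_keys_foldl_insert_key S Prod.fst _ PySem.Dict.empty (by
      rw [show (PySem.Dict.empty : PySem.Dict String Bool).keys = [] from rfl]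
      exact List.nodup_nil)
  have hvals : D.values = D.keys.map (fun k => D.getD k true) :=
    PySem.Dict.values_eq_map_keys D hknd true
  have hgetD : ∀ w, D.getD w true = (S.filter (fun q => q.1 == w)).all (·.2) := by
    intro w
    rw [hD, pvDict_getD]
    rw [show (PySem.Dict.empty : PySem.Dict String Bool).getD w true = true from rfl]
    simp
  have hBval : solution_alt message spoiler_ranges
      = (D.keys.countP (fun w => (S.filter (fun q => q.1 == w)).all (·.2)) : Int) := by
    rw [hsolB, hvals, pvCount_true_map]
    congr 1
    exact List.countP_congr (fun w _ => by rw [hgetD w])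
  -- ===== combine the two counts =====
  rw [hAval, hBval]
  congr 1
  have h1 : D.keys.countP (fun w => (S.filter (fun q => q.1 == w)).all (·.2))
      = D.keys.countP (fun w => !(S.any (fun q => q.1 == w && !q.2))) :=
    List.countP_congr (fun w _ => by rw [pvAll_filter])
  rw [h1]
  have hperm : accA.2.Perm (D.keys.filter (fun w => S.any (fun q => q.1 == w && q.2))) := by
    rw [List.perm_ext_iff_of_nodup haccnd (List.Nodup.filter _ hknd)]
    intro w
    rw [haccmem w, List.mem_filter]
    constructor
    · rintro ⟨q, hq, hq2, hq3⟩
      refine ⟨?_, ?_⟩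
      · rw [hkeys, PySem.Set.mem_ofList]
        exact List.mem_map.mpr ⟨q, hq, hq3⟩
      · rw [List.any_eq_true]
        exact ⟨q, hq, by simp [hq2, hq3]⟩
    · rintro ⟨hw, hany⟩
      rw [List.any_eq_true] at hany
      obtain ⟨q, hq, hqb⟩ := hany
      simp only [Bool.and_eq_true, beq_iff_eq] at hqb
      exact ⟨q, hq, hqb.2, hqb.1⟩
  rw [hperm.countP_eq, List.countP_filter]
  apply List.countP_congr
  intro w hw
  have hmem : ∃ q ∈ S, q.1 = w := by
    rw [hkeys, PySem.Set.mem_ofList] at hw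
    obtain ⟨q, hq, hq1⟩ := List.mem_map.mp hw
    exact ⟨q, hq, hq1⟩
  by_cases hU : (S.any (fun q => q.1 == w && !q.2)) = true
  · simp [hU]
  · rw [Bool.not_eq_true] at hU
    obtain ⟨q, hq, hq1⟩ := hmem
    have hq2 : q.2 = true := by
      by_contra hq2
      rw [Bool.not_eq_true] at hq2
      have : S.any (fun q => q.1 == w && !q.2) = true :=
        List.any_eq_true.mpr ⟨q, hq, by simp [hq1, hq2]⟩
      rw [hU] at this
      exact Bool.false_ne_true this
    have hQB : S.any (fun q => q.1 == w && q.2) = true :=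
      List.any_eq_true.mpr ⟨q, hq, by simp [hq1, hq2]⟩
    simp [hU, hQB]
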